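-- pv_equiv track=rewrite | github.com/FortiumPartners/ensemble | packages/ai/skills/using-anthropic-platform/templates/extended-thinking.template.py | get_budget_for_complexity
-- ===== SOURCE A (Python) =====
-- def get_budget_for_complexity(task: str) -> int:
--     """Suggest budget tokens based on task complexity.
--
--     This is a simple heuristic - adjust based on your needs.
--     """
--     task_lower = task.lower()
--
--     # High complexity indicators
--     high_complexity = ["prove", "derive", "analyze", "optimize", "design", "architect"]
--     if any(word in task_lower for word in high_complexity):
--         return 20000
--
--     # Medium complexity indicators
--     medium_complexity = ["explain", "compare", "evaluate", "implement", "solve"]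
--     if any(word in task_lower for word in medium_complexity):
--         return 10000
--
--     # Default for simpler tasks
--     return 5000
-- ===== SOURCE B (Python) =====
-- _BUDGETS = {
--     "prove": 20000, "derive": 20000, "analyze": 20000,
--     "optimize": 20000, "design": 20000, "architect": 20000,
--     "explain": 10000, "compare": 10000, "evaluate": 10000,
--     "implement": 10000, "solve": 10000,
-- }
--
-- def get_budget_for_complexity(task: str) -> int:
--     """Suggest budget tokens based on task complexity (single keyword->budget map)."""
--     task_lower = task.lower()
--     return max((budget for word, budget in _BUDGETS.items() if word in task_lower),
--                default=5000)
-- ===== Notes on version B (the rewrite author's own statement) =====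
-- stated objective: simpler
-- what changed: Replaces the two tiered any()-checks over separate keyword lists by one keyword->budget map scanned once, returning the max matched budget (default 5000); budget magnitude encodes tier priority.
import Mathlib
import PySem

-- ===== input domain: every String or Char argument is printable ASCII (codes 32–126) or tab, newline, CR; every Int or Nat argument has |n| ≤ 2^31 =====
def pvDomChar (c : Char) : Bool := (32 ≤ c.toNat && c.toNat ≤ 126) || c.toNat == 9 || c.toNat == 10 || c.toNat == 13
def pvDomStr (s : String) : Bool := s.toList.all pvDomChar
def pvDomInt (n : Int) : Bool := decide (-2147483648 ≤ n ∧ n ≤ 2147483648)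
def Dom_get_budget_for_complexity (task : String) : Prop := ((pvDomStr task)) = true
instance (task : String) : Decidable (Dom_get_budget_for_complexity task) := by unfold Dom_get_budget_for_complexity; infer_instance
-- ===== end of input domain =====

-- B replaces A's two tiered any()-checks with one keyword->budget map scanned once, taking the max matched budget (default 5000): simpler.


-- ===== PORT A =====
def get_budget_for_complexity (task : String) : Int :=
  if ["prove", "derive", "analyze", "optimize", "design", "architect"].any
      (fun w => PySem.Str.isIn w (PySem.Str.lower task)) then 20000
  else if ["explain", "compare", "evaluate", "implement", "solve"].any
      (fun w => PySem.Str.isIn w (PySem.Str.lower task)) then 10000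
  else 5000

-- ===== PORT B =====
-- the Python dict _BUDGETS; .items() in insertion order is exactly this association list
def pvBudgets : List (String × Int) :=
  [("prove", 20000), ("derive", 20000), ("analyze", 20000),
   ("optimize", 20000), ("design", 20000), ("architect", 20000),
   ("explain", 10000), ("compare", 10000), ("evaluate", 10000),
   ("implement", 10000), ("solve", 10000)]

def get_budget_for_complexity_alt (task : String) : Int :=
  match (pvBudgets.filter (fun p => PySem.Str.isIn p.1 (PySem.Str.lower task))).map Prod.snd with
  | [] => 5000                       -- max(..., default=5000)
  | b :: rest => rest.foldl max b    -- Python max over the nonempty matches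

-- ===== PRECONDITION & SPEC =====
def Spec_get_budget_for_complexity (task : String) (out : Int) : Prop := out = get_budget_for_complexity_alt task
instance (task : String) (out : Int) : Decidable (Spec_get_budget_for_complexity task out) := by unfold Spec_get_budget_for_complexity; infer_instance

-- ===== CLAIM (what is proved, stated in full; the proofs are below) =====
def Claim_equal_get_budget_for_complexity : Prop := ∀ (task : String), Dom_get_budget_for_complexity task → Spec_get_budget_for_complexity task (get_budget_for_complexity task)

-- ===== LEMMAS AND PROOFS =====

-- ===== VERDICT (by name: the statement is the Claim_ definition above) =====
set_option maxHeartbeats 2000000 in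
theorem get_budget_for_complexity_spec : Claim_equal_get_budget_for_complexity := by
  intro task _
  unfold Spec_get_budget_for_complexity get_budget_for_complexity get_budget_for_complexity_alt pvBudgets
  simp only [List.any_cons, List.any_nil, List.filter_cons, List.filter_nil, Bool.or_false]
  generalize PySem.Str.isIn "prove" (PySem.Str.lower task) = b1
  generalize PySem.Str.isIn "derive" (PySem.Str.lower task) = b2
  generalize PySem.Str.isIn "analyze" (PySem.Str.lower task) = b3
  generalize PySem.Str.isIn "optimize" (PySem.Str.lower task) = b4
  generalize PySem.Str.isIn "design" (PySem.Str.lower task) = b5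
  generalize PySem.Str.isIn "architect" (PySem.Str.lower task) = b6
  generalize PySem.Str.isIn "explain" (PySem.Str.lower task) = b7
  generalize PySem.Str.isIn "compare" (PySem.Str.lower task) = b8
  generalize PySem.Str.isIn "evaluate" (PySem.Str.lower task) = b9
  generalize PySem.Str.isIn "implement" (PySem.Str.lower task) = b10
  generalize PySem.Str.isIn "solve" (PySem.Str.lower task) = b11
  revert b1 b2 b3 b4 b5 b6 b7 b8 b9 b10 b11
  decide
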